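-- pv_equiv track=rewrite | github.com/tanishq-kalra/Alpha-Guard | backend/scraper.py | is_international_ticker
-- ===== SOURCE A (Python) =====
-- INDIAN_TICKERS = {
--     "RELIANCE", "TCS", "INFY", "HDFCBANK", "ICICIBANK", "HINDUNILVR",
--     "SBIN", "BHARTIARTL", "ITC", "KOTAKBANK", "AXISBANK",
--     "BAJFINANCE", "MARUTI", "HCLTECH", "WIPRO", "ASIANPAINT",
--     "SUNPHARMA", "TATAMOTORS", "TATASTEEL", "NTPC", "POWERGRID",
--     "ULTRACEMCO", "NESTLEIND", "TITAN", "ADANIENT", "ADANIPORTS",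
--     "TECHM", "ONGC", "COALINDIA", "JSWSTEEL", "BAJAJFINSV",
--     "DIVISLAB", "DRREDDY", "CIPLA", "BRITANNIA", "GRASIM",
--     "HDFCLIFE", "SBILIFE", "INDUSINDBK", "HEROMOTOCO", "EICHERMOT",
--     "APOLLOHOSP", "TATACONSUM", "BPCL", "HINDALCO",
-- }
--
-- EXCHANGE_SUFFIXES = {
--     ".NS": "NSE (India)",
--     ".BO": "BSE (India)",
--     ".L": "LSE (London)",
--     ".T": "TSE (Tokyo)",
--     ".HK": "HKEX (Hong Kong)",
--     ".DE": "XETRA (Germany)",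
--     ".PA": "Euronext Paris",
--     ".AS": "Euronext Amsterdam",
--     ".TO": "TSX (Toronto)",
--     ".AX": "ASX (Australia)",
--     ".SS": "SSE (Shanghai)",
--     ".SZ": "SZSE (Shenzhen)",
--     ".KS": "KRX (Korea)",
--     ".SI": "SGX (Singapore)",
-- }
--
-- def is_international_ticker(ticker: str) -> bool:
--     """Check if a ticker is for an international (non-US) market."""
--     upper = ticker.upper()
--     for suffix in EXCHANGE_SUFFIXES:
--         if upper.endswith(suffix.upper()):
--             return True
--     if upper in INDIAN_TICKERS:
--         return True
--     return False
-- ===== SOURCE B (Python) =====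
-- # B: instead of scanning all exchange suffixes with endswith, check the last two
-- # and last three characters of the uppercased ticker against two small sets
-- # (every suffix has length 2 or 3), then one membership test for Indian tickers.
-- SUFFIX_LEN3 = {".NS", ".BO", ".HK", ".DE", ".PA", ".AS",
--                ".TO", ".AX", ".SS", ".SZ", ".KS", ".SI"}
-- SUFFIX_LEN2 = {".L", ".T"}
--
-- INDIAN_TICKERS = frozenset(
--     "RELIANCE TCS INFY HDFCBANK ICICIBANK HINDUNILVR SBIN BHARTIARTL ITC "
--     "KOTAKBANK AXISBANK BAJFINANCE MARUTI HCLTECH WIPRO ASIANPAINT SUNPHARMA "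
--     "TATAMOTORS TATASTEEL NTPC POWERGRID ULTRACEMCO NESTLEIND TITAN ADANIENT "
--     "ADANIPORTS TECHM ONGC COALINDIA JSWSTEEL BAJAJFINSV DIVISLAB DRREDDY "
--     "CIPLA BRITANNIA GRASIM HDFCLIFE SBILIFE INDUSINDBK HEROMOTOCO EICHERMOT "
--     "APOLLOHOSP TATACONSUM BPCL HINDALCO".split()
-- )
--
-- def is_international_ticker(ticker: str) -> bool:
--     """Check if a ticker is for an international (non-US) market."""
--     upper = ticker.upper()
--     return upper[-3:] in SUFFIX_LEN3 or upper[-2:] in SUFFIX_LEN2 or upper in INDIAN_TICKERS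
-- ===== Notes on version B (the rewrite author's own statement) =====
-- stated objective: idiomatic
-- what changed: A scans all 14 exchange suffixes with endswith; B slices the last two and last three characters of the uppercased ticker once and tests each slice against a small set grouped by suffix length (exact because every suffix has length 2 or 3), then the Indian-ticker membership check on a frozenset built from one split string.
import Mathlib
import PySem

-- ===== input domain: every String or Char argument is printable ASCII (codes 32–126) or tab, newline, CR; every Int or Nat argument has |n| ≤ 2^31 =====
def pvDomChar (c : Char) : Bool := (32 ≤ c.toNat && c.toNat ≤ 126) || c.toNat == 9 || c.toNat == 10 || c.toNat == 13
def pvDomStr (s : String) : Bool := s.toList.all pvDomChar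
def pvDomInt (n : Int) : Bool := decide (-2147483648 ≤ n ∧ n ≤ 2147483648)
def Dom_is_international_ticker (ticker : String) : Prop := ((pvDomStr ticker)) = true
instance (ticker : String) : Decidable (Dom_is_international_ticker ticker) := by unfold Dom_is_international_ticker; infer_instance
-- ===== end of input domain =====

-- B replaces A's endswith-scan over all 14 exchange suffixes by two constant-time
-- lookups of the last-2 and last-3 character slices in small sets (every suffix has
-- length 2 or 3), with the Indian-ticker set built from one split string: idiomatic.


-- ===== PORT A =====
-- INDIAN_TICKERS (a Python set of strings), as the list of its distinct elements
def pvIndian : List (List Char) :=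
  ["RELIANCE".toList, "TCS".toList, "INFY".toList, "HDFCBANK".toList, "ICICIBANK".toList,
   "HINDUNILVR".toList, "SBIN".toList, "BHARTIARTL".toList, "ITC".toList, "KOTAKBANK".toList,
   "AXISBANK".toList, "BAJFINANCE".toList, "MARUTI".toList, "HCLTECH".toList, "WIPRO".toList,
   "ASIANPAINT".toList, "SUNPHARMA".toList, "TATAMOTORS".toList, "TATASTEEL".toList,
   "NTPC".toList, "POWERGRID".toList, "ULTRACEMCO".toList, "NESTLEIND".toList, "TITAN".toList,
   "ADANIENT".toList, "ADANIPORTS".toList, "TECHM".toList, "ONGC".toList, "COALINDIA".toList,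
   "JSWSTEEL".toList, "BAJAJFINSV".toList, "DIVISLAB".toList, "DRREDDY".toList, "CIPLA".toList,
   "BRITANNIA".toList, "GRASIM".toList, "HDFCLIFE".toList, "SBILIFE".toList, "INDUSINDBK".toList,
   "HEROMOTOCO".toList, "EICHERMOT".toList, "APOLLOHOSP".toList, "TATACONSUM".toList,
   "BPCL".toList, "HINDALCO".toList]

-- the keys of EXCHANGE_SUFFIXES, in insertion order (A iterates only the keys)
def pvSuffixes : List (List Char) :=
  [".NS".toList, ".BO".toList, ".L".toList, ".T".toList, ".HK".toList, ".DE".toList,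
   ".PA".toList, ".AS".toList, ".TO".toList, ".AX".toList, ".SS".toList, ".SZ".toList,
   ".KS".toList, ".SI".toList]

-- A's for-loop with early return: True as soon as one suffix matches
def pvLoopA (u : List Char) : List (List Char) → Bool
  | [] => false
  | k :: ks =>
    if PySem.Chars.endswith u (PySem.Chars.upper k) then true else pvLoopA u ks

def is_international_ticker (ticker : String) : Bool :=
  let upper := PySem.Chars.upper ticker.toList
  if pvLoopA upper pvSuffixes then true
  else if pvIndian.contains upper then true
  else false

-- ===== PORT B =====
-- SUFFIX_LEN3 and SUFFIX_LEN2: the suffixes grouped by length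
def pvSuf3 : List (List Char) :=
  [".NS".toList, ".BO".toList, ".HK".toList, ".DE".toList, ".PA".toList, ".AS".toList,
   ".TO".toList, ".AX".toList, ".SS".toList, ".SZ".toList, ".KS".toList, ".SI".toList]

def pvSuf2 : List (List Char) := [".L".toList, ".T".toList]

-- INDIAN_TICKERS built as frozenset("… space-separated …".split())
def pvIndianWords : List Char :=
  ("RELIANCE TCS INFY HDFCBANK ICICIBANK HINDUNILVR SBIN BHARTIARTL ITC " ++
   "KOTAKBANK AXISBANK BAJFINANCE MARUTI HCLTECH WIPRO ASIANPAINT SUNPHARMA " ++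
   "TATAMOTORS TATASTEEL NTPC POWERGRID ULTRACEMCO NESTLEIND TITAN ADANIENT " ++
   "ADANIPORTS TECHM ONGC COALINDIA JSWSTEEL BAJAJFINSV DIVISLAB DRREDDY " ++
   "CIPLA BRITANNIA GRASIM HDFCLIFE SBILIFE INDUSINDBK HEROMOTOCO EICHERMOT " ++
   "APOLLOHOSP TATACONSUM BPCL HINDALCO").toList

def pvIndianB : List (List Char) := PySem.Set.ofList (PySem.Chars.split₀ pvIndianWords)

def is_international_ticker_alt (ticker : String) : Bool :=
  let upper := PySem.Chars.upper ticker.toList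
  pvSuf3.contains (PySem.List.slice upper (some (-3)) none) ||
  pvSuf2.contains (PySem.List.slice upper (some (-2)) none) ||
  pvIndianB.contains upper

-- ===== PRECONDITION & SPEC =====
def Spec_is_international_ticker (ticker : String) (out : Bool) : Prop := out = is_international_ticker_alt ticker
instance (ticker : String) (out : Bool) : Decidable (Spec_is_international_ticker ticker out) := by unfold Spec_is_international_ticker; infer_instance

-- ===== CLAIM =====
def Claim_equal_is_international_ticker : Prop := ∀ (ticker : String), Dom_is_international_ticker ticker → Spec_is_international_ticker ticker (is_international_ticker ticker)

-- ===== LEMMAS AND PROOFS =====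

-- endswith by a suffix of known length n is equality of the last-n drop
theorem endswith_eq_drop (u s : List Char) :
    PySem.Chars.endswith u s = true ↔ u.drop (u.length - s.length) = s := by
  rw [PySem.Chars.endswith_iff]
  constructor
  · intro h
    obtain ⟨pre, rfl⟩ := h
    simp
  · intro h
    exact h ▸ List.drop_suffix _ u

theorem suffixes_upper_id : ∀ k ∈ pvSuffixes, PySem.Chars.upper k = k := by decide

theorem suffixes_perm : pvSuffixes.Perm (pvSuf3 ++ pvSuf2) := by decide

theorem suffixes_split (s : List Char) : s ∈ pvSuffixes ↔ (s ∈ pvSuf3 ∨ s ∈ pvSuf2) := by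
  rw [suffixes_perm.mem_iff, List.mem_append]

theorem suf3_len : ∀ s ∈ pvSuf3, s.length = 3 := by decide
theorem suf2_len : ∀ s ∈ pvSuf2, s.length = 2 := by decide

theorem pvLoopA_eq_any (u : List Char) (ks : List (List Char)) :
    pvLoopA u ks = ks.any (fun k => PySem.Chars.endswith u (PySem.Chars.upper k)) := by
  induction ks with
  | nil => rfl
  | cons k ks ih => simp only [pvLoopA, ih, List.any_cons]; split_ifs with h <;> simp [h]

theorem loop_eq (u : List Char) :
    pvLoopA u pvSuffixes =
      (pvSuf3.contains (u.drop (u.length - 3)) || pvSuf2.contains (u.drop (u.length - 2))) := by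
  rw [pvLoopA_eq_any, Bool.eq_iff_iff]
  simp only [List.any_eq_true, Bool.or_eq_true, List.contains_iff_mem]
  constructor
  · rintro ⟨s, hs, hend⟩
    rw [suffixes_upper_id s hs, endswith_eq_drop] at hend
    rcases (suffixes_split s).mp hs with h3 | h2
    · exact Or.inl (by rw [suf3_len s h3] at hend; rw [hend]; exact h3)
    · exact Or.inr (by rw [suf2_len s h2] at hend; rw [hend]; exact h2)
  · rintro (h3 | h2)
    · refine ⟨_, (suffixes_split _).mpr (Or.inl h3), ?_⟩
      rw [suffixes_upper_id _ ((suffixes_split _).mpr (Or.inl h3)), endswith_eq_drop]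
      rw [suf3_len _ h3]
    · refine ⟨_, (suffixes_split _).mpr (Or.inr h2), ?_⟩
      rw [suffixes_upper_id _ ((suffixes_split _).mpr (Or.inr h2)), endswith_eq_drop]
      rw [suf2_len _ h2]

set_option maxRecDepth 8000 in
theorem indian_eq : pvIndianB = pvIndian := by decide

-- ===== VERDICT =====
theorem main_eq (u : List Char) :
    (if pvLoopA u pvSuffixes then true else if pvIndian.contains u then true else false) =
      (pvSuf3.contains (PySem.List.slice u (some (-3)) none) ||
       pvSuf2.contains (PySem.List.slice u (some (-2)) none) ||
       pvIndianB.contains u) := by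
  rw [PySem.List.slice_from_neg_ofNat u 3 (by omega),
      PySem.List.slice_from_neg_ofNat u 2 (by omega), indian_eq, loop_eq]
  cases h3 : pvSuf3.contains (u.drop (u.length - 3)) <;>
    cases h2 : pvSuf2.contains (u.drop (u.length - 2)) <;>
    cases hi : pvIndian.contains u <;> simp

theorem is_international_ticker_spec : Claim_equal_is_international_ticker := by
  intro t _
  unfold Spec_is_international_ticker is_international_ticker is_international_ticker_alt
  exact main_eq (PySem.Chars.upper t.toList)
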